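-- pv_equiv track=rewrite | github.com/daniel-reich/ubiquitous-fiesta | hvPiBiwE9TfLnsfz4_3.py | generate_word
-- ===== SOURCE A (Python) =====
-- def generate_word(n, initial=True, seq=[]):
--     if initial and n < 2:
--         return "invalid"
--     if initial:
--         if n == 2:
--             return "b, a"
--         seq = ["b", "a"]
--         return generate_word(n - 2, False, seq[:])
--     if n == 0:
--         return ", ".join(seq)
--     seq.append(seq[-2] + seq[-1])
--     return generate_word(n - 1, False, seq[:])
-- ===== SOURCE B (Python) =====
-- def generate_word(n, initial=True, seq=[]):
--     if initial and n < 2: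
--         return "invalid"
--     words = ["b", "a"] if initial else list(seq)
--     steps = n - 2 if initial else n
--     for _ in range(steps):
--         words.append(words[-2] + words[-1])
--     return ", ".join(words)
-- ===== Notes on version B (the rewrite author's own statement) =====
-- stated objective: simpler
-- what changed: Replaces A's recursion with a seq[:] copy at every step by one iterative loop appending to a single local list joined once at the end; equivalence is about the return value only (A mutates a caller-supplied seq once when initial is false, B never mutates its argument).
import Mathlib
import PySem

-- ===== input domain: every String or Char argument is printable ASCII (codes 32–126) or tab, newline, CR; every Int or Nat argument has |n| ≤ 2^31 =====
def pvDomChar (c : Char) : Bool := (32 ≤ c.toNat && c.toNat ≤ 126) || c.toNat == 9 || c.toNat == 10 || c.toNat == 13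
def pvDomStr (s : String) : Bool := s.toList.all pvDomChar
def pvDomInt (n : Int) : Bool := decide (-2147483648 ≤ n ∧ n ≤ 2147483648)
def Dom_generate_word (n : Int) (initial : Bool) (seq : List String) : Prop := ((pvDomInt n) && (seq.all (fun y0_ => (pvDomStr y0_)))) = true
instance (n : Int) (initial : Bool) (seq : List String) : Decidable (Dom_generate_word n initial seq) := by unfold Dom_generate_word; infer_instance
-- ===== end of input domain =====

-- B replaces A's recursion (with a seq[:] copy per step) by one iterative append loop;
-- equivalence is about the RETURN VALUE only: A mutates a caller-supplied seq once when
-- initial is false, B never mutates its argument.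

-- ===== PORT A =====
-- the initial=False recursive tail of A, with n.toNat as the structural counter
def gwA_loop : Nat → List String → String
  | 0, seq => PySem.Str.join ", " seq
  | f + 1, seq =>
      gwA_loop f (seq ++ [PySem.List.pyGetD seq (-2) "" ++ PySem.List.pyGetD seq (-1) ""])

def generate_word (n : Int) (initial : Bool) (seq : List String) : String :=
  if initial && decide (n < 2) then "invalid"
  else if initial then
    if n = 2 then "b, a"
    else gwA_loop (n - 2).toNat ["b", "a"]
  else gwA_loop n.toNat seq

-- ===== PORT B =====
def generate_word_alt (n : Int) (initial : Bool) (seq : List String) : String :=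
  if initial && decide (n < 2) then "invalid"
  else
    let words := if initial then ["b", "a"] else seq
    let steps := if initial then n - 2 else n
    PySem.Str.join ", "
      ((PySem.List.pyRange 0 steps 1).foldl
        (fun ws _ => ws ++ [PySem.List.pyGetD ws (-2) "" ++ PySem.List.pyGetD ws (-1) ""]) words)

-- ===== PRECONDITION & SPEC =====
-- Pre_ excludes exactly the inputs on which Python A raises: with initial=False, a negative
-- n recurses without bound (RecursionError) and a positive n with len(seq) < 2 hits an
-- IndexError on seq[-2].
def Pre_generate_word (n : Int) (initial : Bool) (seq : List String) : Prop :=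
  initial = true ∨ (0 ≤ n ∧ (n = 0 ∨ 2 ≤ seq.length))
instance (n : Int) (initial : Bool) (seq : List String) : Decidable (Pre_generate_word n initial seq) := by unfold Pre_generate_word; infer_instance
def pvWitness_generate_word : Int × Bool × List String := (5, true, [])

def Spec_generate_word (n : Int) (initial : Bool) (seq : List String) (out : String) : Prop := out = generate_word_alt n initial seq
instance (n : Int) (initial : Bool) (seq : List String) (out : String) : Decidable (Spec_generate_word n initial seq out) := by unfold Spec_generate_word; infer_instance

-- ===== CLAIM (what is proved, stated in full; the proofs are below) =====
def Claim_equal_generate_word : Prop := ∀ (n : Int) (initial : Bool) (seq : List String), Dom_generate_word n initial seq → Pre_generate_word n initial seq → Spec_generate_word n initial seq (generate_word n initial seq)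

-- ===== LEMMAS AND PROOFS =====
-- the single append step both programs perform
def gwStep (ws : List String) : List String :=
  ws ++ [PySem.List.pyGetD ws (-2) "" ++ PySem.List.pyGetD ws (-1) ""]

theorem gwA_loop_eq (f : Nat) (s : List String) :
    gwA_loop f s = PySem.Str.join ", " (gwStep^[f] s) := by
  induction f generalizing s with
  | zero => rfl
  | succ f ih =>
      rw [gwA_loop, ih, Function.iterate_succ_apply]
      rfl

theorem foldl_gwStep (l : List Int) (s : List String) :
    l.foldl (fun ws _ => ws ++ [PySem.List.pyGetD ws (-2) "" ++ PySem.List.pyGetD ws (-1) ""]) s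
      = gwStep^[l.length] s := by
  induction l generalizing s with
  | nil => rfl
  | cons x xs ih =>
      rw [List.foldl_cons, ih, List.length_cons, Function.iterate_succ_apply]
      rfl

theorem alt_eq (n : Int) (initial : Bool) (seq : List String) :
    generate_word_alt n initial seq =
      if initial && decide (n < 2) then "invalid"
      else PySem.Str.join ", "
        (gwStep^[((if initial then n - 2 else n)).toNat] (if initial then ["b", "a"] else seq)) := by
  simp only [generate_word_alt]
  split
  · rfl
  · rw [foldl_gwStep, PySem.List.length_pyRange_one]
    norm_num

-- ===== VERDICT (by name: the statement is the Claim_ definition above) =====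
theorem generate_word_spec : Claim_equal_generate_word := by
  intro n initial seq _ _
  show generate_word n initial seq = generate_word_alt n initial seq
  rw [alt_eq]
  cases initial with
  | false =>
      simp only [Bool.false_and, if_neg (by simp : ¬ (false = true))]
      exact gwA_loop_eq n.toNat seq
  | true =>
      by_cases h2 : n < 2
      · simp [generate_word, h2]
      · simp only [Bool.true_and, decide_eq_true_eq, if_neg h2]
        by_cases he : n = 2
        · subst he
          simp [generate_word]
          decide
        · rw [generate_word]
          simp only [Bool.true_and, decide_eq_true_eq, if_neg h2, if_neg he]
          exact gwA_loop_eq (n - 2).toNat ["b", "a"]
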